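-- pv_equiv track=rewrite | github.com/Lucas-Mueller/Master-Thesis-Lucas-Mueller | core/services/preference_aggregation_service.py | _apply_tiebreaker
-- ===== SOURCE A (Python) =====
-- from typing import List, Dict, Any, Optional
--
-- def _apply_tiebreaker(
--
--     tied_principles: List[str],
--     tiebreak_order: List[str]
-- ) -> str:
--     """
--     Apply deterministic tiebreaker using config's tiebreak_order.
--
--     The tiebreak_order represents the manipulator's preference order from the config.
--     We select the FIRST principle in tiebreak_order that appears in the tied set,
--     making the manipulator's predetermined preference the tiebreaker.
--
--     Args:
--         tied_principles: List of principle names with identical (lowest) scores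
--         tiebreak_order: Preference-ordered list of all principles from config
--
--     Returns:
--         Single principle name selected as least popular after tiebreak
--
--     Raises:
--         ValueError: If no tied principle found in tiebreak_order
--
--     Example:
--         tied_principles = ['maximizing_floor', 'maximizing_average']
--         tiebreak_order = ['maximizing_floor', 'maximizing_average', ...]
--         Returns: 'maximizing_floor' (first in tiebreak_order)
--     """
--     if not tied_principles:
--         raise ValueError("Cannot apply tiebreaker to empty list")
--
--     if not tiebreak_order:
--         # Fallback: alphabetical if no tiebreak order provided
--         return sorted(tied_principles)[0]
--
--     # Find first principle in tiebreak_order that appears in tied set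
--     for principle in tiebreak_order:
--         if principle in tied_principles:
--             return principle
--
--     # Fallback if none match (should not happen with valid data)
--     raise ValueError(
--         f"No tied principle found in tiebreak order. "
--         f"Tied: {tied_principles}, Order: {tiebreak_order}"
--     )
-- ===== SOURCE B (Python) =====
-- def _apply_tiebreaker(tied_principles, tiebreak_order):
--     if not tied_principles:
--         raise ValueError("Cannot apply tiebreaker to empty list")
--
--     if not tiebreak_order:
--         # Fallback: alphabetical if no tiebreak order provided
--         return sorted(tied_principles)[0]
--
--     # Index table: each principle in tiebreak_order -> its first occurrence index
--     pos = {}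
--     for i, p in enumerate(tiebreak_order):
--         if p not in pos:
--             pos[p] = i
--
--     # One pass over the tied set, keeping the principle with the smallest position
--     best = None
--     for p in tied_principles:
--         j = pos.get(p)
--         if j is not None and (best is None or j < best[0]):
--             best = (j, p)
--
--     if best is None:
--         raise ValueError(
--             f"No tied principle found in tiebreak order. "
--             f"Tied: {tied_principles}, Order: {tiebreak_order}"
--         )
--     return best[1]
-- ===== Notes on version B (the rewrite author's own statement) =====
-- stated objective: alternative
-- what changed: Instead of scanning tiebreak_order and testing membership in tied_principles for each entry, B precomputes a first-occurrence index table for tiebreak_order and makes one pass over tied_principles selecting the minimum-index match.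
import Mathlib
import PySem

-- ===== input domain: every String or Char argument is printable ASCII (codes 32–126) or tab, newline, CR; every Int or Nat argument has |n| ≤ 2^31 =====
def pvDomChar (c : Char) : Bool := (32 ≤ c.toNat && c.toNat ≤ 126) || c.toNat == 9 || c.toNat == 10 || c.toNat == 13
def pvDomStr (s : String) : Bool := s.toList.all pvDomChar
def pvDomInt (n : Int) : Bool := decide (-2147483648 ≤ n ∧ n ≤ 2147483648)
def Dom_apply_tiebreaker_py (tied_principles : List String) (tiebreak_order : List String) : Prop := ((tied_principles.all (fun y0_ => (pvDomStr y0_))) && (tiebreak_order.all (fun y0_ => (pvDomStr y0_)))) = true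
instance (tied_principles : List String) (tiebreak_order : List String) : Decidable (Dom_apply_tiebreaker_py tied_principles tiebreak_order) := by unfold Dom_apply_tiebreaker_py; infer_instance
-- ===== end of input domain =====

-- B replaces A's scan of tiebreak_order with membership tests by a precomputed
-- first-occurrence index table and a single minimum-selecting pass over tied_principles
-- (alternative decomposition, same return value wherever A returns).


-- ===== PORT A =====
-- A's loop "for principle in tiebreak_order: if principle in tied_principles: return principle"
def pvFindFirst : List String → List String → Option String
  | [], _ => none
  | p :: rest, tied => if p ∈ tied then some p else pvFindFirst rest tied

def apply_tiebreaker_py (tied_principles : List String) (tiebreak_order : List String) : String :=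
  if tied_principles = [] then ""            -- A raises ValueError here (outside Pre_)
  else if tiebreak_order = [] then (PySem.List.sorted tied_principles (fun x => x) false).headD ""
  else match pvFindFirst tiebreak_order tied_principles with
    | some p => p
    | none => ""                             -- A raises ValueError here (outside Pre_)

-- ===== PORT B =====
-- B's first loop: pos = {}; for i, p in enumerate(tiebreak_order): if p not in pos: pos[p] = i
def pvBuildPos (tiebreak_order : List String) : PySem.Dict String Int :=
  (PySem.List.enumerate tiebreak_order 0).foldl
    (fun d ip => if d.contains ip.2 then d else d.insert ip.2 ip.1) PySem.Dict.empty

-- B's second loop body: j = pos.get(p); if j is not None and (best is None or j < best[0]): best = (j, p)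
def pvBestStep (pos : PySem.Dict String Int) (b : Option (Int × String)) (p : String) :
    Option (Int × String) :=
  match pos.get? p with
  | none => b
  | some j =>
    match b with
    | none => some (j, p)
    | some (bj, _) => if j < bj then some (j, p) else b

def apply_tiebreaker_py_alt (tied_principles : List String) (tiebreak_order : List String) : String :=
  if tied_principles = [] then ""            -- B raises ValueError here (outside Pre_)
  else if tiebreak_order = [] then (PySem.List.sorted tied_principles (fun x => x) false).headD ""
  else
    match tied_principles.foldl (pvBestStep (pvBuildPos tiebreak_order)) none with
    | some (_, p) => p
    | none => ""                             -- B raises ValueError here (outside Pre_)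

-- ===== PRECONDITION & SPEC =====
-- Pre_ excludes exactly the inputs on which A raises ValueError: an empty tied set, and a
-- nonempty tiebreak_order containing no tied principle (B raises ValueError there too).
def Pre_apply_tiebreaker_py (tied_principles : List String) (tiebreak_order : List String) : Prop :=
  tied_principles ≠ [] ∧ (tiebreak_order = [] ∨ ∃ p ∈ tied_principles, p ∈ tiebreak_order)
instance (tied_principles : List String) (tiebreak_order : List String) : Decidable (Pre_apply_tiebreaker_py tied_principles tiebreak_order) := by unfold Pre_apply_tiebreaker_py; infer_instance

def pvWitness_apply_tiebreaker_py : List String × List String := (["b", "a"], ["a", "b", "c"])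

def Spec_apply_tiebreaker_py (tied_principles : List String) (tiebreak_order : List String) (out : String) : Prop := out = apply_tiebreaker_py_alt tied_principles tiebreak_order
instance (tied_principles : List String) (tiebreak_order : List String) (out : String) : Decidable (Spec_apply_tiebreaker_py tied_principles tiebreak_order out) := by unfold Spec_apply_tiebreaker_py; infer_instance

-- ===== CLAIM (what is proved, stated in full; the proofs are below) =====
def Claim_equal_apply_tiebreaker_py : Prop := ∀ (tied_principles : List String) (tiebreak_order : List String), Dom_apply_tiebreaker_py tied_principles tiebreak_order → Pre_apply_tiebreaker_py tied_principles tiebreak_order → Spec_apply_tiebreaker_py tied_principles tiebreak_order (apply_tiebreaker_py tied_principles tiebreak_order)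

-- ===== LEMMAS AND PROOFS =====

theorem pvFindFirst_eq_none (order tied : List String) (h : ∀ p ∈ order, p ∉ tied) :
    pvFindFirst order tied = none := by
  induction order with
  | nil => rfl
  | cons x xs ih =>
    have hx := h x (by simp)
    simp [pvFindFirst, hx]
    exact ih (fun p hp => h p (by simp [hp]))

theorem pvFindFirst_eq_some (order tied : List String) (q : String)
    (hqT : q ∈ tied) (hqO : q ∈ order)
    (hmin : ∀ p ∈ tied, p ∈ order → order.idxOf q ≤ order.idxOf p) :
    pvFindFirst order tied = some q := by
  induction order with
  | nil => cases hqO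
  | cons x xs ih =>
    by_cases hx : x ∈ tied
    · simp only [pvFindFirst, if_pos hx]
      by_cases hqx : q = x
      · rw [hqx]
      · exfalso
        have h1 : List.idxOf q (x :: xs) ≤ List.idxOf x (x :: xs) := hmin x hx (by simp)
        rw [List.idxOf_cons_self, List.idxOf_cons_ne xs (Ne.symm hqx)] at h1
        omega
    · have hqx : q ≠ x := fun h => hx (h ▸ hqT)
      simp only [pvFindFirst, if_neg hx]
      apply ih
      · cases hqO with
        | head => exact absurd rfl hqx
        | tail _ h => exact h
      · intro p hpT hpO
        have hpx : p ≠ x := fun h => hx (h ▸ hpT)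
        have := hmin p hpT (by simp [hpO])
        rw [List.idxOf_cons_ne xs (Ne.symm hqx), List.idxOf_cons_ne xs (Ne.symm hpx)] at this
        omega

-- The dict built by B's first loop maps p to its first-occurrence index in the order list.
theorem pvBuildPos_get?_aux (l : List String) (s : Int) (d : PySem.Dict String Int)
    (p : String) :
    ((PySem.List.enumerate l s).foldl
        (fun d ip => if d.contains ip.2 then d else d.insert ip.2 ip.1) d).get? p =
      (match d.get? p with
       | some v => some v
       | none => if p ∈ l then some (s + (l.idxOf p : Int)) else none) := by
  induction l generalizing s d with
  | nil => cases h : d.get? p <;> simp [PySem.List.enumerate, h]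
  | cons x xs ih =>
    rw [PySem.List.enumerate_cons, List.foldl_cons, ih]
    by_cases hc : d.contains x = true
    · simp only [hc, if_true]
      cases h : d.get? p with
      | some v => simp
      | none =>
        have hpx : p ≠ x := by
          intro he
          rw [he] at h
          rw [PySem.Dict.contains_eq_isSome_get?, h] at hc
          simp at hc
        simp only [List.mem_cons, List.idxOf_cons_ne xs (Ne.symm hpx), Nat.succ_eq_add_one]
        by_cases hm : p ∈ xs
        · simp only [hm, or_true, if_pos]
          congr 1
          push_cast
          ring
        · simp [hm, hpx]
    · simp only [hc]
      simp only [Bool.false_eq_true, if_false]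
      by_cases hpx : p = x
      · subst hpx
        rw [PySem.Dict.get?_insert_self]
        have h : d.get? p = none := by
          rw [PySem.Dict.get?_eq_none_iff_contains]
          simpa using hc
        simp [h, List.idxOf_cons_self]
      · rw [PySem.Dict.get?_insert_of_ne d s hpx]
        cases h : d.get? p with
        | some v => simp
        | none =>
          simp only [List.mem_cons, List.idxOf_cons_ne xs (Ne.symm hpx), Nat.succ_eq_add_one]
          by_cases hm : p ∈ xs
          · simp only [hm, or_true, if_pos]
            congr 1
            push_cast
            ring
          · simp [hm, hpx]

theorem pvBuildPos_get? (order : List String) (p : String) :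
    (pvBuildPos order).get? p =
      if p ∈ order then some ((order.idxOf p : Nat) : Int) else none := by
  rw [pvBuildPos, pvBuildPos_get?_aux]
  simp [PySem.Dict.get?_empty]

-- Invariant of B's selection loop over the tied list.
def pvInv (order seen : List String) : Option (Int × String) → Prop
  | none => ∀ p ∈ seen, p ∉ order
  | some (j, q) => q ∈ seen ∧ q ∈ order ∧ j = ((order.idxOf q : Nat) : Int) ∧
      ∀ p ∈ seen, p ∈ order → order.idxOf q ≤ order.idxOf p

theorem pvFold_inv (order : List String) (rest : List String) :
    ∀ (seen : List String) (b : Option (Int × String)), pvInv order seen b →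
      pvInv order (seen ++ rest) (rest.foldl (pvBestStep (pvBuildPos order)) b) := by
  induction rest with
  | nil => intro seen b h; simpa using h
  | cons x xs ih =>
    intro seen b hb
    have hstep : pvInv order (seen ++ [x]) (pvBestStep (pvBuildPos order) b x) := by
      unfold pvBestStep
      rw [pvBuildPos_get? order x]
      by_cases hxO : x ∈ order
      · simp only [hxO, if_true]
        match b, hb with
        | none, hb =>
          refine ⟨by simp, hxO, rfl, ?_⟩
          intro p hp hpO
          rcases List.mem_append.mp hp with h | h
          · exact absurd hpO (hb p h)
          · simp at h; subst h; exact le_refl _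
        | some (bj, bq), hb =>
          obtain ⟨hq1, hq2, hq3, hq4⟩ := hb
          dsimp only
          by_cases hlt : ((List.idxOf x order : Nat) : Int) < bj
          · rw [if_pos hlt]
            refine ⟨by simp, hxO, rfl, ?_⟩
            intro p hp hpO
            rcases List.mem_append.mp hp with h | h
            · have := hq4 p h hpO
              rw [hq3] at hlt
              omega
            · simp at h; subst h; exact le_refl _
          · rw [if_neg hlt]
            refine ⟨by simp [hq1], hq2, hq3, ?_⟩
            intro p hp hpO
            rcases List.mem_append.mp hp with h | h
            · exact hq4 p h hpO
            · simp at h; subst h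
              rw [hq3] at hlt
              omega
      · simp only [hxO, if_false]
        match b, hb with
        | none, hb =>
          intro p hp
          rcases List.mem_append.mp hp with h | h
          · exact hb p h
          · simp at h; subst h; exact hxO
        | some (bj, bq), hb =>
          obtain ⟨hq1, hq2, hq3, hq4⟩ := hb
          refine ⟨by simp [hq1], hq2, hq3, ?_⟩
          intro p hp hpO
          rcases List.mem_append.mp hp with h | h
          · exact hq4 p h hpO
          · simp at h; subst h; exact absurd hpO hxO
    have := ih (seen ++ [x]) _ hstep
    simpa [List.append_assoc] using this

-- ===== VERDICT (by name: the statement is the Claim_ definition above) =====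
theorem apply_tiebreaker_py_spec : Claim_equal_apply_tiebreaker_py := by
  intro tied order _hdom hpre
  unfold Spec_apply_tiebreaker_py apply_tiebreaker_py apply_tiebreaker_py_alt
  obtain ⟨htied, _⟩ := hpre
  rw [if_neg htied, if_neg htied]
  by_cases horder : order = []
  · rw [if_pos horder, if_pos horder]
  · rw [if_neg horder, if_neg horder]
    have hinv : pvInv order tied (tied.foldl (pvBestStep (pvBuildPos order)) none) := by
      have := pvFold_inv order tied [] none (by intro p hp; cases hp)
      simpa using this
    cases hres : tied.foldl (pvBestStep (pvBuildPos order)) none with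
    | none =>
      rw [hres] at hinv
      have hff : pvFindFirst order tied = none := by
        apply pvFindFirst_eq_none
        intro p hpO hpT
        exact hinv p hpT hpO
      rw [hff]
    | some jq =>
      obtain ⟨j, q⟩ := jq
      rw [hres] at hinv
      obtain ⟨hq1, hq2, _, hq4⟩ := hinv
      rw [pvFindFirst_eq_some order tied q hq1 hq2 hq4]
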